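-- pv_equiv track=rewrite | github.com/seongjin96/Programmers | Level 2/귤 고르기_2.py | solution
-- ===== SOURCE A (Python) =====
-- from collections import defaultdict
--
-- def solution(k, tangerine):
--     answer = 0
--
--     tangerine_dict = defaultdict(int)
--
--     for num in tangerine:
--         tangerine_dict[num] += 1
--
--     sorted_tangerine = sorted(tangerine_dict.items(), key = lambda x: x[1], reverse= True)
--
--     for key, value in sorted_tangerine:
--         if k <= 0:
--           break
--         k -= value
--         answer += 1
--
--     return answer
-- ===== SOURCE B (Python) =====
-- def solution(k, tangerine):
--     freq = {}
--     for num in tangerine: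
--         freq[num] = freq.get(num, 0) + 1
--     bucket = {}
--     for c in freq.values():
--         bucket[c] = bucket.get(c, 0) + 1
--     answer = 0
--     for c in range(len(tangerine), 0, -1):
--         if k <= 0:
--             break
--         m = bucket.get(c, 0)
--         take = min(m, -(-k // c))
--         k -= take * c
--         answer += take
--     return answer
-- ===== Notes on version B (the rewrite author's own statement) =====
-- stated objective: alternative
-- what changed: A sorts the frequency table by count and walks it kind by kind; B never sorts: it builds a counts-of-counts dictionary and scans the possible frequencies from len(tangerine) down to 1, consuming each whole bucket in one ceiling-division step.
import Mathlib
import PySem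

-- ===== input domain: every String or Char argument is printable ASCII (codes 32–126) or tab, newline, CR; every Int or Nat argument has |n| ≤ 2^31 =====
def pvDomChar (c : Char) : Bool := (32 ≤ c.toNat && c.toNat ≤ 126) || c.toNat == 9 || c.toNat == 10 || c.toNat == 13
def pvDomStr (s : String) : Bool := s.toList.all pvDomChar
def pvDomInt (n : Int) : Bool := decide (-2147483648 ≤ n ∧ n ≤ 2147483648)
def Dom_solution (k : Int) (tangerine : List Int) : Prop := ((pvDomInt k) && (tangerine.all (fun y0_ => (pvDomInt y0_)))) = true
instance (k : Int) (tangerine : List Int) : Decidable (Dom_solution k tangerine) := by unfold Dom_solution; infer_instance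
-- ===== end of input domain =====

-- B replaces A's sort of the frequency table by a countdown over possible
-- frequencies (bounded by len(tangerine)) with a counts-of-counts dictionary,
-- taking each whole bucket in one arithmetic step (ceiling division).

-- ===== PORT A =====
-- the second for-loop of A, with its break
def loopA : List (Int × Int) → Int → Int → Int
  | [], _, answer => answer
  | (_, value) :: rest, k, answer =>
    if k ≤ 0 then answer else loopA rest (k - value) (answer + 1)

def solution (k : Int) (tangerine : List Int) : Int :=
  let tangerine_dict :=
    tangerine.foldl (fun d num => d.modify num 0 (· + 1)) (PySem.Dict.empty : PySem.Dict Int Int)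
  let sorted_tangerine := PySem.List.sorted tangerine_dict.items (fun x => x.2) true
  loopA sorted_tangerine k 0

-- ===== PORT B =====
-- -(-k // c) of Source B: ceiling division for positive c
def pvCeil (k c : Int) : Int := -(PySem.Int.floordiv (-k) c)

-- the for-loop over range(len(tangerine), 0, -1), with its break
def loopB (bucket : PySem.Dict Int Int) : List Int → Int → Int → Int
  | [], _, answer => answer
  | c :: rest, k, answer =>
    if k ≤ 0 then answer
    else
      let m := bucket.getD c 0
      let take := min m (pvCeil k c)
      loopB bucket rest (k - take * c) (answer + take)

def solution_alt (k : Int) (tangerine : List Int) : Int :=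
  let freq :=
    tangerine.foldl (fun d num => d.insert num (d.getD num 0 + 1)) (PySem.Dict.empty : PySem.Dict Int Int)
  let bucket :=
    freq.values.foldl (fun d c => d.insert c (d.getD c 0 + 1)) (PySem.Dict.empty : PySem.Dict Int Int)
  loopB bucket (PySem.List.pyRange (tangerine.length : Int) 0 (-1)) k 0

-- ===== PRECONDITION & SPEC =====
def Spec_solution (k : Int) (tangerine : List Int) (out : Int) : Prop := out = solution_alt k tangerine
instance (k : Int) (tangerine : List Int) (out : Int) : Decidable (Spec_solution k tangerine out) := by unfold Spec_solution; infer_instance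

-- ===== CLAIM (what is proved, stated in full; the proofs are below) =====
def Claim_equal_solution : Prop := ∀ (k : Int) (tangerine : List Int), Dom_solution k tangerine → Spec_solution k tangerine (solution k tangerine)

-- ===== LEMMAS AND PROOFS =====

-- the common greedy over the bare list of frequencies
def g : List Int → Int → Int → Int
  | [], _, a => a
  | v :: rest, k, a => if k ≤ 0 then a else g rest (k - v) (a + 1)

theorem g_nonpos (l : List Int) (k a : Int) (hk : k ≤ 0) : g l k a = a := by
  cases l with
  | nil => rfl
  | cons v rest => simp [g, hk]

theorem loopA_eq_g (l : List (Int × Int)) (k a : Int) :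
    loopA l k a = g (l.map (·.2)) k a := by
  induction l generalizing k a with
  | nil => rfl
  | cons p rest ih =>
    obtain ⟨key, value⟩ := p
    simp only [loopA, g, List.map_cons]
    split_ifs with h
    · rfl
    · exact ih _ _

theorem pvCeil_bounds (k c : Int) (hc : 0 < c) :
    (pvCeil k c - 1) * c < k ∧ k ≤ pvCeil k c * c :=
  (PySem.Int.neg_floordiv_neg_eq_iff_of_pos hc).mp rfl

theorem pvCeil_eq_one (k c : Int) (hc : 0 < c) (h1 : 0 < k) (h2 : k ≤ c) :
    pvCeil k c = 1 := by
  unfold pvCeil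
  rw [PySem.Int.neg_floordiv_neg_eq_iff_of_pos hc]
  constructor <;> simp <;> omega

theorem pvCeil_succ (k c : Int) (hc : 0 < c) (_h : 0 < k - c) :
    pvCeil k c = pvCeil (k - c) c + 1 := by
  have hb := pvCeil_bounds (k - c) c hc
  unfold pvCeil
  rw [PySem.Int.neg_floordiv_neg_eq_iff_of_pos hc]
  unfold pvCeil at hb
  constructor <;> nlinarith [hb.1, hb.2]

theorem pvCeil_pos (k c : Int) (hc : 0 < c) (hk : 0 < k) : 0 < pvCeil k c := by
  have hb := pvCeil_bounds k c hc
  nlinarith [hb.2]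

theorem g_replicate (t : Nat) (c : Int) (hc : 0 < c) :
    ∀ (w : List Int) (k a : Int), 0 < k →
      g (List.replicate t c ++ w) k a
        = g w (k - min (t : Int) (pvCeil k c) * c) (a + min (t : Int) (pvCeil k c)) := by
  induction t with
  | zero =>
    intro w k a hk
    have hp := pvCeil_pos k c hc hk
    have h0 : min ((0 : Nat) : Int) (pvCeil k c) = 0 := by
      rw [Nat.cast_zero]
      exact min_eq_left (le_of_lt hp)
    rw [h0]
    simp
  | succ t ih =>
    intro w k a hk
    have hnk : ¬ k ≤ 0 := by omega
    have hstep : g (List.replicate (t + 1) c ++ w) k a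
        = g (List.replicate t c ++ w) (k - c) (a + 1) := by
      simp [List.replicate_succ, g, hnk]
    by_cases hrem : 0 < k - c
    · rw [hstep, ih w (k - c) (a + 1) hrem]
      have hsucc := pvCeil_succ k c hc hrem
      have hp := pvCeil_pos (k - c) c hc hrem
      have hmin : min ((t + 1 : Nat) : Int) (pvCeil k c)
          = min ((t : Nat) : Int) (pvCeil (k - c) c) + 1 := by
        push_cast
        omega
      rw [hmin]
      ring_nf
    · -- k - c ≤ 0: the first copy exhausts k
      have hone : pvCeil k c = 1 := pvCeil_eq_one k c hc hk (by omega)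
      have hmin : min ((t + 1 : Nat) : Int) (pvCeil k c) = 1 := by
        rw [hone]; push_cast; omega
      rw [hstep, hmin, g_nonpos _ _ _ (by omega), g_nonpos _ _ _ (by omega)]
-- in a ≥-sorted list whose elements are ≤ c, the copies of c form a prefix
theorem desc_split (vs : List Int) (c : Int)
    (hs : vs.Pairwise (· ≥ ·)) (hle : ∀ v ∈ vs, v ≤ c) :
    ∃ vs', vs = List.replicate (vs.count c) c ++ vs'
      ∧ vs'.Pairwise (· ≥ ·) ∧ (∀ v ∈ vs', 1 ≤ v → v ≤ c - 1 ∧ 1 ≤ v)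
      ∧ c ∉ vs' ∧ (∀ v ∈ vs', v ≤ c) ∧ (∀ v ∈ vs', v ∈ vs) := by
  induction vs with
  | nil => exact ⟨[], by simp⟩
  | cons x rest ih =>
    rcases List.pairwise_cons.mp hs with ⟨hx, hrest⟩
    by_cases hxc : x = c
    · subst hxc
      obtain ⟨vs', heq, hp, hb, hnc, hlec, hmem⟩ :=
        ih hrest (fun v hv => hle v (List.mem_cons_of_mem _ hv))
      refine ⟨vs', ?_, hp, hb, hnc, hlec, fun v hv => List.mem_cons_of_mem _ (hmem v hv)⟩
      have : (x :: rest).count x = rest.count x + 1 := by simp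
      rw [this, List.replicate_succ]
      simpa using heq
    · -- x < c, hence c occurs nowhere (sorted descending)
      have hcnot : c ∉ (x :: rest) := by
        intro hc
        rcases List.mem_cons.mp hc with h | h
        · exact hxc h.symm
        · have := hx c h
          have := hle x (List.mem_cons_self ..)
          omega
      have hcount : (x :: rest).count c = 0 := List.count_eq_zero.mpr hcnot
      refine ⟨x :: rest, by simp [hcount], hs, ?_, hcnot, hle, fun v hv => hv⟩
      intro v hv h1
      have hvc := hle v hv
      have hne : v ≠ c := fun h => hcnot (h ▸ hv)
      exact ⟨by omega, h1⟩

theorem loopB_eq_g (bucket : PySem.Dict Int Int) (hi : Nat) :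
    ∀ (vs : List Int), vs.Pairwise (· ≥ ·) →
      (∀ v ∈ vs, 1 ≤ v ∧ v ≤ (hi : Int)) →
      (∀ c' : Int, 1 ≤ c' → c' ≤ (hi : Int) → bucket.getD c' 0 = (vs.count c' : Int)) →
      ∀ (k a : Int),
        loopB bucket (PySem.List.pyRange (hi : Int) 0 (-1)) k a = g vs k a := by
  induction hi with
  | zero =>
    intro vs hs hbd hcnt k a
    have hvs : vs = [] := by
      cases vs with
      | nil => rfl
      | cons v rest =>
        have := hbd v (List.mem_cons_self ..)
        omega
    subst hvs
    rw [PySem.List.pyRange_neg_one_eq_nil (by norm_num)]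
    rfl
  | succ hi ih =>
    intro vs hs hbd hcnt k a
    have hpos : (0 : Int) < ((hi + 1 : Nat) : Int) := by positivity
    rw [PySem.List.pyRange_neg_one_cons hpos]
    have hcast : ((hi + 1 : Nat) : Int) - 1 = (hi : Int) := by push_cast; ring
    by_cases hk : k ≤ 0
    · rw [g_nonpos _ _ _ hk]; simp [loopB, hk]
    · have hk' : 0 < k := by omega
      set c : Int := ((hi + 1 : Nat) : Int) with hc
      obtain ⟨vs', heq, hp, hb, hnc, hlec, hmem⟩ :=
        desc_split vs c hs (fun v hv => (hbd v hv).2)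
      set t : Nat := vs.count c with ht
      have hgetD : bucket.getD c 0 = (t : Int) := hcnt c (by omega) le_rfl
      have hunfold : loopB bucket (c :: PySem.List.pyRange (((hi + 1 : Nat) : Int) - 1) 0 (-1)) k a
          = loopB bucket (PySem.List.pyRange (((hi + 1 : Nat) : Int) - 1) 0 (-1))
              (k - min (bucket.getD c 0) (pvCeil k c) * c)
              (a + min (bucket.getD c 0) (pvCeil k c)) := by
        simp [loopB, hk]
      rw [hunfold, hgetD, hcast]
      have hg : g vs k a = g vs' (k - min (t : Int) (pvCeil k c) * c) (a + min (t : Int) (pvCeil k c)) := by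
        rw [heq]
        exact g_replicate t c hpos vs' k a hk'
      rw [hg]
      apply ih vs' hp
      · intro v hv
        have h1 := (hbd v (hmem v hv)).1
        have h2 := (hb v hv h1).1
        constructor
        · exact h1
        · omega
      · intro c' h1 h2
        have hne : c' ≠ c := by omega
        have : vs.count c' = vs'.count c' := by
          rw [heq, List.count_append, List.count_replicate]
          simp only [beq_iff_eq]
          rw [if_neg (fun h : c = c' => hne h.symm)]
          omega
        rw [hcnt c' h1 (by omega), this]

-- ===== VERDICT (by name: the statement is the Claim_ definition above) =====
theorem solution_spec : Claim_equal_solution := by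
  intro k tangerine _
  unfold Spec_solution solution solution_alt
  simp only [← PySem.Dict.counter_eq_foldl, PySem.Dict.foldl_insert_getD_add_one_eq_counter]
  set cnt := PySem.Dict.counter tangerine with hcnt
  set vs : List Int := (PySem.List.sorted cnt.items (fun x => x.2) true).map (·.2) with hvs
  rw [loopA_eq_g]
  have hperm : vs.Perm cnt.values :=
    (PySem.List.sorted_perm cnt.items (fun x => x.2) true).map _
  symm
  apply loopB_eq_g
  · rw [List.pairwise_map]
    exact PySem.List.sorted_pairwise_rev cnt.items (fun x => x.2)
  · intro v hv
    have hv' : v ∈ cnt.values := hperm.mem_iff.mp hv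
    have hvi : v ∈ cnt.items.map Prod.snd := hv'
    rw [hcnt, PySem.Dict.items_counter, List.map_map] at hvi
    obtain ⟨key, hkey, hval⟩ := List.mem_map.mp hvi
    have hkmem : key ∈ tangerine := (PySem.Set.mem_ofList tangerine key).mp hkey
    have h1 : 1 ≤ tangerine.count key := List.count_pos_iff.mpr hkmem
    have h2 : tangerine.count key ≤ tangerine.length := List.count_le_length
    simp only [Function.comp] at hval
    rw [← hval]
    constructor
    · exact_mod_cast h1
    · exact_mod_cast h2
  · intro c' _ _
    rw [PySem.Dict.getD_counter]
    exact_mod_cast congrArg Nat.cast (hperm.count_eq c').symm
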